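-- pv_equiv track=rewrite | github.com/Knowledge-Base-9921/Codility | Lesson10-Prime Composite/peaks.py | solution
-- ===== SOURCE A (Python) =====
-- def solution(A):
--     # Implement your solution here
--     n = len(A)
--
--     # If the array has less than 3 elements, no peaks can exist.
--     # Therefore, no blocks can be formed to satisfy the condition.
--     if n < 3:
--         return 0
--
--     # Step 1: Identify all peaks in the array.
--     # A peak A[i] is defined as A[i-1] < A[i] > A[i+1].
--     # Peaks cannot be at the first (index 0) or last (index n-1) elements.
--     peaks_bool = [False] * n  # Boolean array to mark peak positions
--     num_actual_peaks = 0      # Counter for the total number of peaks found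
--
--     for i in range(1, n - 1):
--         if A[i] > A[i-1] and A[i] > A[i+1]:
--             peaks_bool[i] = True
--             num_actual_peaks += 1
--
--     # If no peaks are found in the entire array, no blocks can contain a peak.
--     if num_actual_peaks == 0:
--         return 0
--
--     # Step 2: Precompute a prefix sum array for peaks.
--     # prefix_peaks_count[i] will store the number of peaks in A[0...i-1].
--     # This allows for O(1) checking if a range contains a peak.
--     prefix_peaks_count = [0] * (n + 1)
--     for i in range(1, n + 1):
--         prefix_peaks_count[i] = prefix_peaks_count[i-1] + (1 if peaks_bool[i-1] else 0)
--
--     # Helper function to check if a given number of blocks (K) is possible.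
--     # It verifies if N is divisible by K and if each of the K blocks contains at least one peak.
--     def check_k_blocks(K):
--         # If N is not divisible by K, we cannot form K same-sized blocks.
--         if n % K != 0:
--             return False
--
--         block_size = n // K
--
--         # Iterate through each of the K blocks.
--         for block_idx in range(K):
--             # Calculate the start and end indices of the current block.
--             block_start = block_idx * block_size
--             block_end = (block_idx + 1) * block_size - 1
--
--             # Check if there is at least one peak in the current block
--             # using the precomputed prefix_peaks_count array.
--             # If prefix_peaks_count[block_end + 1] - prefix_peaks_count[block_start] is 0,
--             # it means no peaks are present in this block.
--             if prefix_peaks_count[block_end + 1] - prefix_peaks_count[block_start] == 0: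
--                 return False # This K is not possible because a block lacks a peak.
--
--         return True # All K blocks contain at least one peak.
--
--     # Step 3: Find the maximum K (number of blocks) that satisfies the conditions.
--     # We iterate through possible values of K.
--     # K must be a divisor of N, and K must be less than or equal to the total number of peaks.
--     # We iterate up to sqrt(N) to find divisors efficiently.
--     max_possible_blocks = 0
--
--     i = 1
--     while i * i <= n:
--         if n % i == 0:
--             # Case 1: K = i (current divisor)
--             k1 = i
--             # Check if this K is a valid number of blocks (K <= total peaks)
--             if k1 <= num_actual_peaks:
--                 if check_k_blocks(k1):
--                     max_possible_blocks = max(max_possible_blocks, k1)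
--
--             # Case 2: K = N // i (the corresponding pair divisor)
--             k2 = n // i
--             # Avoid double-checking if i*i == n (i.e., k1 == k2)
--             # Also check if this K is a valid number of blocks (K <= total peaks)
--             if k2 != k1 and k2 <= num_actual_peaks:
--                 if check_k_blocks(k2):
--                     max_possible_blocks = max(max_possible_blocks, k2)
--         i += 1
--
--     return max_possible_blocks
-- ===== SOURCE B (Python) =====
-- def solution(A):
--     n = len(A)
--     peaks = [i for i in range(1, n - 1) if A[i - 1] < A[i] > A[i + 1]]
--     if not peaks:
--         return 0
--     for k in range(n, 0, -1):
--         if n % k == 0: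
--             size = n // k
--             if len({p // size for p in peaks}) == k:
--                 return k
--     return 0
-- ===== Notes on version B (the rewrite author's own statement) =====
-- stated objective: simpler
-- what changed: Replaces the boolean peak array, prefix-sum table and per-block range queries with a peaks index list and, per candidate block count K (scanned top-down with early return instead of max over sqrt-paired divisors), a set of block ids p//size that must have exactly K elements.
import Mathlib
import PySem

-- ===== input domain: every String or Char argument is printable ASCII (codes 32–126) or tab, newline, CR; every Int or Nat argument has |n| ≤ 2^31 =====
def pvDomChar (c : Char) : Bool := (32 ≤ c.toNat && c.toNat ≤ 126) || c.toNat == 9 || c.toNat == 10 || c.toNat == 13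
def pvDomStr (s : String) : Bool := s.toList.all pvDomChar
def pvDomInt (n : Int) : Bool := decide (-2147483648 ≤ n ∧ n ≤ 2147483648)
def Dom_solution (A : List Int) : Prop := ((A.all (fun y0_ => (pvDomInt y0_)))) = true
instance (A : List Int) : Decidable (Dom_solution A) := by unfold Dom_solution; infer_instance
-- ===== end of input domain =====

-- B replaces A's boolean peak array + prefix-sum table + per-block range queries by a peak-index
-- list and, per candidate block count K (scanned top-down with early return), a set of covered
-- block ids; objective: simpler.

-- ===== PORT A =====
-- A-side helpers: the peak-marking loop body, the nested helper check_k_blocks, and the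
-- while-loop body (Python's 'while i*i <= n' visits exactly i = 1..⌊√n⌋).
def peaksStep (A : List Int) (st : List Bool × Nat) (i : Nat) : List Bool × Nat :=
  if A.getD i 0 > A.getD (i-1) 0 ∧ A.getD i 0 > A.getD (i+1) 0 then
    (st.1.set i true, st.2 + 1)
  else st

def checkKBlocks (n : Nat) (prefixPeaks : List Nat) (K : Nat) : Bool :=
  if n % K ≠ 0 then false else
  let blockSize := n / K
  (List.range K).all (fun b =>
    !(prefixPeaks.getD ((b+1)*blockSize) 0 - prefixPeaks.getD (b*blockSize) 0 == 0))

def whileBody (n np : Nat) (check : Nat → Bool) (m i : Nat) : Nat :=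
  if n % i = 0 then
    let m1 := if i ≤ np ∧ check i then max m i else m
    let k2 := n / i
    if k2 ≠ i ∧ k2 ≤ np ∧ check k2 then max m1 k2 else m1
  else m

def solution (A : List Int) : Int :=
  let n := A.length
  if n < 3 then 0 else
  let res := (List.range' 1 (n-2)).foldl (peaksStep A) (List.replicate n false, 0)
  let numPeaks := res.2
  if numPeaks = 0 then 0 else
  let prefixPeaks := res.1.scanl (fun acc b => acc + if b then 1 else 0) 0
  (((List.range' 1 (Nat.sqrt n)).foldl (whileBody n numPeaks (checkKBlocks n prefixPeaks)) 0 : Nat) : Int)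

-- ===== PORT B =====
def solution_alt (A : List Int) : Int :=
  let n := A.length
  let peaks := (List.range' 1 (n-2)).filter
    (fun i => decide (A.getD (i-1) 0 < A.getD i 0 ∧ A.getD i 0 > A.getD (i+1) 0))
  if peaks = [] then 0 else
  match (List.range' 1 n).reverse.find? (fun k =>
      n % k == 0 && (PySem.Set.ofList (peaks.map (fun p => p / (n / k)))).length == k) with
  | some k => (k : Int)
  | none => 0

-- ===== PRECONDITION & SPEC =====
def Spec_solution (A : List Int) (out : Int) : Prop := out = solution_alt A
instance (A : List Int) (out : Int) : Decidable (Spec_solution A out) := by unfold Spec_solution; infer_instance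

-- ===== CLAIM (what is proved, stated in full; the proofs are below) =====
def Claim_equal_solution : Prop := ∀ (A : List Int), Dom_solution A → Spec_solution A (solution A)

-- ===== LEMMAS AND PROOFS =====

-- peak predicate and peak list
def pkB (A : List Int) (i : Nat) : Bool :=
  decide (A.getD (i-1) 0 < A.getD i 0 ∧ A.getD i 0 > A.getD (i+1) 0)

def peaksL (A : List Int) : List Nat := (List.range' 1 (A.length-2)).filter (pkB A)

def pbF (A : List Int) (j : Nat) : Bool := decide (j < A.length - 1) && pkB A j

lemma pkB_zero (A : List Int) : pkB A 0 = false := by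
  simp [pkB]

lemma peaks_fold (A : List Int) (m : Nat) : ∀ (a c : Nat),
    (List.range' a m).foldl (peaksStep A)
      ((List.range A.length).map (fun j => decide (j < a) && pkB A j), c) =
      ((List.range A.length).map (fun j => decide (j < a + m) && pkB A j),
       c + ((List.range' a m).filter (pkB A)).length) := by
  induction m with
  | zero => intro a c; simp
  | succ m ih =>
    intro a c
    rw [List.range'_succ, List.foldl_cons, List.filter_cons]
    have hstep : peaksStep A ((List.range A.length).map (fun j => decide (j < a) && pkB A j), c) a =
        ((List.range A.length).map (fun j => decide (j < a + 1) && pkB A j),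
         c + (if pkB A a then 1 else 0)) := by
      unfold peaksStep
      by_cases h : pkB A a = true
      · have hcond : A.getD a 0 > A.getD (a-1) 0 ∧ A.getD a 0 > A.getD (a+1) 0 := by
          have := of_decide_eq_true h
          exact ⟨this.1, this.2⟩
        rw [if_pos hcond, if_pos h]
        refine Prod.ext ?_ (by simp)
        · apply List.ext_getElem
          · simp
          · intro j hj1 hj2
            simp only [List.length_set, List.length_map, List.length_range] at hj1
            rw [List.getElem_set]
            by_cases hja : a = j
            · subst hja
              simp [h]
            · simp only [List.getElem_map, List.getElem_range]
              rw [if_neg hja]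
              have hd : decide (j < a) = decide (j < a + 1) := by
                rw [decide_eq_decide]; omega
              rw [hd]
      · have hcond : ¬ (A.getD a 0 > A.getD (a-1) 0 ∧ A.getD a 0 > A.getD (a+1) 0) := by
          intro hc
          exact h (decide_eq_true ⟨hc.1, hc.2⟩)
        rw [if_neg hcond, if_neg (by simp [h])]
        refine Prod.ext ?_ (by simp [h])
        apply List.map_congr_left
        intro j hj
        by_cases hja : j = a
        · subst hja
          simp [Bool.eq_false_iff.mpr h]
        · have hd : decide (j < a) = decide (j < a + 1) := by
            rw [decide_eq_decide]; omega
          rw [hd]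
    rw [hstep, ih (a+1) _]
    have hab : a + 1 + m = a + (m + 1) := by omega
    rw [hab]
    refine Prod.ext rfl ?_
    by_cases h : pkB A a = true
    · simp [h]; omega
    · simp [h]

lemma replicate_eq_map (A : List Int) :
    List.replicate A.length false =
      (List.range A.length).map (fun j => decide (j < 1) && pkB A j) := by
  apply List.ext_getElem
  · simp
  · intro j hj1 hj2
    simp only [List.getElem_replicate, List.getElem_map, List.getElem_range]
    by_cases hj : j = 0
    · subst hj; simp [pkB_zero]
    · have hd : decide (j < 1) = false := by simp [Nat.lt_one_iff, hj]
      rw [hd, Bool.false_and]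

lemma peaks_fold_spec (A : List Int) (h3 : 3 ≤ A.length) :
    (List.range' 1 (A.length-2)).foldl (peaksStep A) (List.replicate A.length false, 0) =
      ((List.range A.length).map (pbF A), (peaksL A).length) := by
  rw [replicate_eq_map A, peaks_fold A (A.length-2) 1 0]
  have h1 : 1 + (A.length - 2) = A.length - 1 := by omega
  rw [h1]
  simp [pbF, peaksL]

-- scanl prefix sums
lemma scanl_getD (pb : List Bool) : ∀ (c j : Nat), j ≤ pb.length →
    (pb.scanl (fun acc b => acc + if b then 1 else 0) c).getD j 0 = c + (pb.take j).count true := by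
  induction pb with
  | nil =>
    intro c j hj
    simp only [List.length_nil, Nat.le_zero] at hj
    subst hj
    simp [List.scanl_nil]
  | cons b pb ih =>
    intro c j hj
    rw [List.scanl_cons]
    cases j with
    | zero => simp
    | succ j =>
      simp only [List.getD_cons_succ, List.take_succ_cons, List.count_cons]
      rw [ih (c + if b then 1 else 0) j (by simpa using hj)]
      by_cases hb : b = true <;> simp [hb] <;> omega

def Pref (A : List Int) : List Nat :=
  ((List.range A.length).map (pbF A)).scanl (fun acc b => acc + if b then 1 else 0) 0

lemma Pref_getD (A : List Int) (j : Nat) (hj : j ≤ A.length) :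
    (Pref A).getD j 0 = (List.range j).countP (pbF A) := by
  unfold Pref
  rw [scanl_getD _ 0 j (by simpa using hj)]
  rw [← List.map_take, List.take_range, Nat.min_eq_left hj]
  simp [List.count, List.countP_map, Function.comp_def]

lemma pbF_iff (A : List Int) (j : Nat) : pbF A j = true ↔ j ∈ peaksL A := by
  unfold pbF peaksL
  rw [List.mem_filter]
  constructor
  · intro h
    have h1 : j < A.length - 1 := by simpa using (Bool.and_elim_left h)
    have h2 : pkB A j = true := Bool.and_elim_right h
    have hj0 : j ≠ 0 := by rintro rfl; rw [pkB_zero] at h2; exact absurd h2 (by simp)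
    refine ⟨?_, h2⟩
    rw [List.mem_range'_1]
    omega
  · intro ⟨h1, h2⟩
    rw [List.mem_range'_1] at h1
    simp only [Bool.and_eq_true, decide_eq_true_eq]
    exact ⟨by omega, h2⟩

lemma div_eq_iff_bounds (p s b : Nat) (hs : 0 < s) :
    p / s = b ↔ b * s ≤ p ∧ p < b * s + s := by
  constructor
  · intro h
    have h1 := Nat.div_add_mod' p s
    rw [h] at h1
    have h2 := Nat.mod_lt p hs
    omega
  · intro ⟨h1, h2⟩
    have hle : b ≤ p / s := (Nat.le_div_iff_mul_le hs).mpr h1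
    have hlt : p / s < b + 1 := (Nat.div_lt_iff_lt_mul hs).mpr
      (by rw [add_mul, one_mul]; omega)
    omega

-- the block-b prefix-difference test, in terms of the peaks list
lemma block_diff (A : List Int) (s b : Nat) (hs : 0 < s) (hbn : b * s + s ≤ A.length) :
    ((Pref A).getD ((b+1)*s) 0 - (Pref A).getD (b*s) 0 ≠ 0) ↔
      ∃ p ∈ peaksL A, p / s = b := by
  have h1 : (b+1)*s = b*s + s := by ring
  rw [h1, Pref_getD A (b*s + s) hbn, Pref_getD A (b*s) (by omega)]
  rw [List.range_add, List.countP_append]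
  have h2 : (List.range (b*s)).countP (pbF A) + (List.countP (pbF A) ((List.range s).map (b*s + ·)))
      - (List.range (b*s)).countP (pbF A) = List.countP (pbF A) ((List.range s).map (b*s + ·)) := by
    omega
  rw [h2, List.countP_map]
  constructor
  · intro h
    have : ∃ t ∈ List.range s, (pbF A ∘ (b*s + ·)) t = true := by
      by_contra hne
      push_neg at hne
      have : List.countP (pbF A ∘ (b*s + ·)) (List.range s) = 0 := by
        rw [List.countP_eq_zero]
        exact hne
      omega
    obtain ⟨t, ht, hpt⟩ := this
    rw [List.mem_range] at ht
    refine ⟨b*s + t, (pbF_iff A _).mp hpt, ?_⟩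
    rw [div_eq_iff_bounds _ _ _ hs]
    omega
  · intro ⟨p, hp, hdiv⟩
    rw [div_eq_iff_bounds _ _ _ hs] at hdiv
    have hcnt : 0 < List.countP (pbF A ∘ (b*s + ·)) (List.range s) := by
      rw [List.countP_pos_iff]
      exact ⟨p - b*s, by rw [List.mem_range]; omega,
        by simpa [Function.comp, Nat.add_sub_cancel' hdiv.1] using (pbF_iff A p).mpr hp⟩
    omega

-- checkKBlocks in terms of block coverage by peaks
lemma div_facts (A : List Int) (k : Nat) (hk : 0 < k) (hdvd : k ∣ A.length)
    (h3 : 3 ≤ A.length) : 0 < A.length / k ∧ k * (A.length / k) = A.length := by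
  have hkn : k ≤ A.length := Nat.le_of_dvd (by omega) hdvd
  exact ⟨Nat.div_pos hkn hk, Nat.mul_div_cancel' hdvd⟩

lemma checkKBlocks_iff (A : List Int) (k : Nat) (hk : 0 < k) (hdvd : k ∣ A.length)
    (h3 : 3 ≤ A.length) :
    checkKBlocks A.length (Pref A) k = true ↔
      ∀ b < k, ∃ p ∈ peaksL A, p / (A.length / k) = b := by
  obtain ⟨hs, hmul⟩ := div_facts A k hk hdvd h3
  unfold checkKBlocks
  rw [if_neg (by simp [Nat.mod_eq_zero_of_dvd hdvd])]
  simp only [List.all_eq_true, List.mem_range, Bool.not_eq_eq_eq_not, Bool.not_true,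
    beq_eq_false_iff_ne, ne_eq]
  constructor
  · intro h b hb
    exact (block_diff A (A.length / k) b hs
      (by calc b * (A.length / k) + A.length / k = (b+1) * (A.length / k) := by ring
            _ ≤ k * (A.length / k) := Nat.mul_le_mul_right _ (by omega)
            _ = A.length := hmul)).mp (h b hb)
  · intro h b hb
    exact (block_diff A (A.length / k) b hs
      (by calc b * (A.length / k) + A.length / k = (b+1) * (A.length / k) := by ring
            _ ≤ k * (A.length / k) := Nat.mul_le_mul_right _ (by omega)
            _ = A.length := hmul)).mpr (h b hb)

lemma coverage_iff (A : List Int) (k : Nat) (hk : 0 < k)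
    (hdvd : k ∣ A.length) (h3 : 3 ≤ A.length) :
    ((PySem.Set.ofList ((peaksL A).map (fun p => p / (A.length / k)))).length = k) ↔
      ∀ b < k, ∃ p ∈ peaksL A, p / (A.length / k) = b := by
  obtain ⟨hs, hmul⟩ := div_facts A k hk hdvd h3
  set s := A.length / k with hsdef
  set S : List Nat := PySem.Set.ofList ((peaksL A).map (fun p => p / s)) with hS
  have hnodup : S.Nodup := PySem.Set.nodup_ofList _
  have hmem : ∀ x, x ∈ S ↔ ∃ p ∈ peaksL A, p / s = x := by
    intro x
    rw [hS, PySem.Set.mem_ofList, List.mem_map]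
  have hlt : ∀ x ∈ S, x < k := by
    intro x hx
    obtain ⟨p, hp, rfl⟩ := (hmem x).mp hx
    have hpn : p < A.length := by
      have := (pbF_iff A p).mpr hp
      unfold pbF at this
      have := (Bool.and_elim_left this)
      simp at this
      omega
    rw [Nat.div_lt_iff_lt_mul hs]
    calc p < A.length := hpn
      _ = k * s := hmul.symm
      _ = k * s := rfl
  have hsub : S.toFinset ⊆ Finset.range k := by
    intro x hx
    rw [List.mem_toFinset] at hx
    rw [Finset.mem_range]
    exact hlt x hx
  have hcard : S.toFinset.card = S.length := List.toFinset_card_of_nodup hnodup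
  constructor
  · intro hlen b hb
    have : S.toFinset = Finset.range k := by
      apply Finset.eq_of_subset_of_card_le hsub
      rw [hcard, hlen, Finset.card_range]
    have hbS : b ∈ S := by
      rw [← List.mem_toFinset, this, Finset.mem_range]; exact hb
    exact (hmem b).mp hbS
  · intro h
    have hsub2 : Finset.range k ⊆ S.toFinset := by
      intro b hb
      rw [Finset.mem_range] at hb
      rw [List.mem_toFinset, hmem]
      exact h b hb
    have : S.toFinset = Finset.range k := Finset.Subset.antisymm hsub hsub2
    rw [← hcard, this, Finset.card_range]

-- find? over the descending list [n, n-1, ..., 1]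
lemma find?_reverse_range' (p : Nat → Bool) (n : Nat) : ∀ (k : Nat),
    ((List.range' 1 n).reverse.find? p = some k) ↔
      (1 ≤ k ∧ k ≤ n ∧ p k = true ∧ ∀ j, k < j → j ≤ n → p j = false) := by
  induction n with
  | zero => intro k; simp; omega
  | succ n ih =>
    intro k
    rw [List.range'_concat, List.reverse_append, List.reverse_singleton, List.singleton_append,
      show 1 + 1 * n = 1 + n by omega]
    by_cases hp : p (1 + n) = true
    · rw [List.find?_cons_of_pos hp]
      simp only [Option.some_inj]
      constructor
      · rintro rfl
        exact ⟨by omega, by omega, hp, fun j hj1 hj2 => by omega⟩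
      · rintro ⟨h1, h2, h3, h4⟩
        by_cases hk : k = 1 + n
        · omega
        · rw [h4 (1+n) (by omega) (by omega)] at hp
          exact absurd hp (by simp)
    · have hp' : p (1 + n) = false := Bool.eq_false_iff.mpr hp
      rw [List.find?_cons_of_neg hp, ih k]
      constructor
      · rintro ⟨h1, h2, h3, h4⟩
        refine ⟨h1, by omega, h3, fun j hj1 hj2 => ?_⟩
        by_cases hj : j = 1 + n
        · subst hj; exact hp'
        · exact h4 j hj1 (by omega)
      · rintro ⟨h1, h2, h3, h4⟩
        have hk : k ≤ n := by
          by_cases hk : k = n + 1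
          · subst hk
            rw [show n + 1 = 1 + n by omega] at h3
            rw [h3] at hp'
            exact absurd hp' (by simp)
          · omega
        exact ⟨h1, hk, h3, fun j hj1 hj2 => h4 j hj1 (by omega)⟩

-- foldl max facts
lemma foldl_max_init_le (l : List Nat) : ∀ (m : Nat), m ≤ l.foldl max m := by
  induction l with
  | nil => intro m; simp
  | cons a l ih => intro m; rw [List.foldl_cons]; exact le_trans (le_max_left _ _) (ih _)

lemma foldl_max_ge (l : List Nat) : ∀ (m : Nat) (x : Nat), x ∈ l → x ≤ l.foldl max m := by
  induction l with
  | nil => intro m x hx; simp at hx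
  | cons a l ih =>
    intro m x hx
    rw [List.foldl_cons]
    rcases List.mem_cons.mp hx with rfl | hx
    · exact le_trans (le_max_right m x) (foldl_max_init_le l _)
    · exact ih _ x hx

lemma foldl_max_mem (l : List Nat) : ∀ (m : Nat), l.foldl max m = m ∨ l.foldl max m ∈ l := by
  induction l with
  | nil => intro m; simp
  | cons a l ih =>
    intro m
    rw [List.foldl_cons]
    rcases ih (max m a) with h | h
    · rw [h]
      rcases Nat.le_total m a with hma | hma
      · right; rw [Nat.max_eq_right hma]; exact List.mem_cons_self
      · left; exact Nat.max_eq_left hma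
    · right; exact List.mem_cons_of_mem _ h

-- A's loop-body contribution at i
def candA (A : List Int) (i : Nat) : Nat :=
  max (if A.length % i = 0 ∧ i ≤ (peaksL A).length ∧ checkKBlocks A.length (Pref A) i then i else 0)
      (if A.length % i = 0 ∧ A.length / i ≠ i ∧ A.length / i ≤ (peaksL A).length ∧
          checkKBlocks A.length (Pref A) (A.length / i) then A.length / i else 0)

lemma whileBody_eq (A : List Int) (m i : Nat) :
    whileBody A.length (peaksL A).length (checkKBlocks A.length (Pref A)) m i =
      max m (candA A i) := by
  unfold whileBody candA
  simp only []
  split_ifs <;> first | omega | tauto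

-- the validity predicate A's loop is maximising over
def GoodK (A : List Int) (k : Nat) : Prop :=
  0 < k ∧ k ∣ A.length ∧ k ≤ (peaksL A).length ∧ checkKBlocks A.length (Pref A) k = true

lemma foldA_eq_foldl_max (A : List Int) (l : List Nat) (m : Nat) :
    l.foldl (whileBody A.length (peaksL A).length (checkKBlocks A.length (Pref A))) m =
      (l.map (candA A)).foldl max m := by
  rw [List.foldl_map]
  have h : whileBody A.length (peaksL A).length (checkKBlocks A.length (Pref A)) =
      fun m i => max m (candA A i) := funext fun m => funext fun i => whileBody_eq A m i
  rw [h]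

lemma candA_good (A : List Int) (i : Nat) (hi : 1 ≤ i) :
    candA A i = 0 ∨ GoodK A (candA A i) := by
  unfold candA
  rcases Nat.le_total
    (if A.length % i = 0 ∧ i ≤ (peaksL A).length ∧ checkKBlocks A.length (Pref A) i then i else 0)
    (if A.length % i = 0 ∧ A.length / i ≠ i ∧ A.length / i ≤ (peaksL A).length ∧
        checkKBlocks A.length (Pref A) (A.length / i) then A.length / i else 0) with h | h
  · rw [Nat.max_eq_right h]
    split_ifs with hc
    · obtain ⟨h1, h2, h3, h4⟩ := hc
      rcases Nat.eq_zero_or_pos (A.length / i) with h0 | h0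
      · left; exact h0
      · right
        exact ⟨h0, Nat.div_dvd_of_dvd (Nat.dvd_of_mod_eq_zero h1), h3, h4⟩
    · left; rfl
  · rw [Nat.max_eq_left h]
    split_ifs with hc
    · right
      obtain ⟨h1, h2, h3⟩ := hc
      exact ⟨by omega, Nat.dvd_of_mod_eq_zero h1, h2, h3⟩
    · left; rfl

lemma good_le_fold (A : List Int) (h3 : 3 ≤ A.length) (k : Nat) (hg : GoodK A k) :
    k ≤ (List.range' 1 (Nat.sqrt A.length)).foldl
      (whileBody A.length (peaksL A).length (checkKBlocks A.length (Pref A))) 0 := by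
  obtain ⟨hk0, hdvd, hnp, hchk⟩ := hg
  have hkn : k ≤ A.length := Nat.le_of_dvd (by omega) hdvd
  rw [foldA_eq_foldl_max]
  by_cases hsq : k * k ≤ A.length
  · -- i = k is visited and contributes k via the first branch
    have hmem : k ∈ List.range' 1 (Nat.sqrt A.length) := by
      rw [List.mem_range'_1]
      have := Nat.le_sqrt.mpr hsq
      omega
    have hcand : k ≤ candA A k := by
      unfold candA
      rw [if_pos ⟨Nat.mod_eq_zero_of_dvd hdvd, hnp, hchk⟩]
      exact le_max_left _ _
    exact le_trans hcand (foldl_max_ge _ _ _ (List.mem_map_of_mem hmem))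
  · -- i = A.length / k is visited and contributes k via the second branch
    set i := A.length / k with hidef
    have hik : i < k := by
      rw [hidef, Nat.div_lt_iff_lt_mul hk0]
      omega
    have hi0 : 0 < i := Nat.div_pos hkn hk0
    have hin : i * i ≤ A.length := by
      calc i * i ≤ i * k := Nat.mul_le_mul_left _ (by omega)
        _ = A.length := Nat.div_mul_cancel hdvd
    have hmem : i ∈ List.range' 1 (Nat.sqrt A.length) := by
      rw [List.mem_range'_1]
      have := Nat.le_sqrt.mpr hin
      omega
    have hni : A.length / i = k := Nat.div_div_self hdvd (by omega)
    have hcand : k ≤ candA A i := by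
      unfold candA
      rw [hni]
      have hcond : A.length % i = 0 ∧ k ≠ i ∧ k ≤ (peaksL A).length ∧
          checkKBlocks A.length (Pref A) k = true :=
        ⟨Nat.mod_eq_zero_of_dvd (Nat.div_dvd_of_dvd hdvd), by omega, hnp, hchk⟩
      rw [if_pos hcond]
      exact le_max_right _ _
    exact le_trans hcand (foldl_max_ge _ _ _ (List.mem_map_of_mem hmem))

lemma fold_good_or_zero (A : List Int) :
    ((List.range' 1 (Nat.sqrt A.length)).foldl
      (whileBody A.length (peaksL A).length (checkKBlocks A.length (Pref A))) 0) = 0 ∨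
    GoodK A ((List.range' 1 (Nat.sqrt A.length)).foldl
      (whileBody A.length (peaksL A).length (checkKBlocks A.length (Pref A))) 0) := by
  rw [foldA_eq_foldl_max]
  rcases foldl_max_mem ((List.range' 1 (Nat.sqrt A.length)).map (candA A)) 0 with h | h
  · left; exact h
  · obtain ⟨i, hi, hci⟩ := List.mem_map.mp h
    rw [List.mem_range'_1] at hi
    rcases candA_good A i (by omega) with h0 | hgood
    · left; omega
    · right; rw [← hci]; exact hgood

-- B's candidate test
def goodBb (A : List Int) (k : Nat) : Bool :=
  A.length % k == 0 &&
    (PySem.Set.ofList ((peaksL A).map (fun p => p / (A.length / k)))).length == k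

lemma goodBb_iff (A : List Int) (h3 : 3 ≤ A.length) (k : Nat) (hk : 1 ≤ k) :
    goodBb A k = true ↔ GoodK A k := by
  unfold goodBb GoodK
  simp only [Bool.and_eq_true, beq_iff_eq]
  constructor
  · rintro ⟨h1, h2⟩
    have hdvd := Nat.dvd_of_mod_eq_zero h1
    have hchk := (checkKBlocks_iff A k (by omega) hdvd h3).mpr
      ((coverage_iff A k (by omega) hdvd h3).mp h2)
    refine ⟨by omega, hdvd, ?_, hchk⟩
    calc k = (PySem.Set.ofList ((peaksL A).map (fun p => p / (A.length / k)))).length := h2.symm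
      _ ≤ ((peaksL A).map (fun p => p / (A.length / k))).length := PySem.Set.length_ofList_le _
      _ = (peaksL A).length := List.length_map _
  · rintro ⟨h0, hdvd, hnp, hchk⟩
    refine ⟨Nat.mod_eq_zero_of_dvd hdvd, ?_⟩
    exact (coverage_iff A k (by omega) hdvd h3).mpr
      ((checkKBlocks_iff A k (by omega) hdvd h3).mp hchk)

lemma good_one (A : List Int) (h3 : 3 ≤ A.length) (hne : peaksL A ≠ []) : GoodK A 1 := by
  have hnp : 1 ≤ (peaksL A).length := List.length_pos_of_ne_nil hne
  refine ⟨by omega, one_dvd _, hnp, ?_⟩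
  rw [checkKBlocks_iff A 1 (by omega) (one_dvd _) h3]
  intro b hb
  obtain ⟨p, hp⟩ := List.exists_mem_of_ne_nil _ hne
  refine ⟨p, hp, ?_⟩
  have hplt : p < A.length := by
    have := hp
    unfold peaksL at this
    rw [List.mem_filter, List.mem_range'_1] at this
    omega
  rw [Nat.div_one]
  rw [Nat.div_eq_of_lt hplt]
  omega

theorem solution_eq_alt (A : List Int) : solution A = solution_alt A := by
  have hfold : (List.range' 1 (A.length - 2)).filter
      (fun i => decide (A.getD (i-1) 0 < A.getD i 0 ∧ A.getD i 0 > A.getD (i+1) 0)) = peaksL A := rfl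
  by_cases h3 : A.length < 3
  · have hvA : solution A = 0 := by unfold solution; rw [if_pos h3]
    have hpe : peaksL A = [] := by
      unfold peaksL
      rw [show A.length - 2 = 0 from by omega]
      rfl
    have hvB : solution_alt A = 0 := by
      unfold solution_alt
      simp only []
      rw [hfold, hpe]
      simp
    rw [hvA, hvB]
  · push_neg at h3
    have hres := peaks_fold_spec A h3
    by_cases hnp : (peaksL A).length = 0
    · have hpe : peaksL A = [] := List.length_eq_zero_iff.mp hnp
      have hvA : solution A = 0 := by
        unfold solution
        rw [if_neg (by omega)]
        simp only []
        rw [hres]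
        simp [hnp]
      have hvB : solution_alt A = 0 := by
        unfold solution_alt
        simp only []
        rw [hfold, hpe]
        simp
      rw [hvA, hvB]
    · have hpne : peaksL A ≠ [] := fun h => hnp (by rw [h]; rfl)
      have hone : GoodK A 1 := good_one A h3 hpne
      set R : Nat := (List.range' 1 (Nat.sqrt A.length)).foldl
        (whileBody A.length (peaksL A).length (checkKBlocks A.length (Pref A))) 0 with hRdef
      have hvA : solution A = (R : Int) := by
        unfold solution
        rw [if_neg (by omega)]
        simp only []
        rw [hres]
        rw [if_neg hnp]
        rfl
      have hR1 : 1 ≤ R := good_le_fold A h3 1 hone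
      have hRgood : GoodK A R := by
        rcases fold_good_or_zero A with h0 | hg
        · rw [hRdef] at *; omega
        · exact hg
      have hRn : R ≤ A.length := Nat.le_of_dvd (by omega) hRgood.2.1
      have hpred : (fun k => A.length % k == 0 &&
          (PySem.Set.ofList ((peaksL A).map (fun p => p / (A.length / k)))).length == k) =
          goodBb A := rfl
      cases hfind : (List.range' 1 A.length).reverse.find? (goodBb A) with
      | none =>
        exfalso
        have h1mem : (1 : Nat) ∈ (List.range' 1 A.length).reverse := by
          rw [List.mem_reverse, List.mem_range'_1]
          omega
        have := List.find?_eq_none.mp hfind 1 h1mem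
        rw [(goodBb_iff A h3 1 (by omega)).mpr hone] at this
        exact absurd this (by simp)
      | some kB =>
        obtain ⟨hkB1, hkBn, hkBp, hkBmax⟩ := (find?_reverse_range' (goodBb A) A.length kB).mp hfind
        have hkBgood : GoodK A kB := (goodBb_iff A h3 kB hkB1).mp hkBp
        have hRB : R = kB := by
          have h1 : kB ≤ R := good_le_fold A h3 kB hkBgood
          have h2 : R ≤ kB := by
            by_contra hlt
            push_neg at hlt
            have := hkBmax R hlt hRn
            rw [(goodBb_iff A h3 R (by omega)).mpr hRgood] at this
            exact absurd this (by simp)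
          omega
        have hvB : solution_alt A = (kB : Int) := by
          unfold solution_alt
          simp only []
          rw [hfold, if_neg hpne, hpred, hfind]
        rw [hvA, hvB, hRB]

-- ===== VERDICT (by name: the statement is the Claim_ definition above) =====
theorem solution_spec : Claim_equal_solution := by
  intro A _
  unfold Spec_solution
  exact solution_eq_alt A
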